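-- pv_equiv track=rewrite | github.com/bikaldev/CallBreak-Bot | utility.py | bidStateCalc
-- ===== SOURCE A (Python) =====
-- def bidStateCalc(cards):
--     SW = 0
--     FS = 0
--     RS = 0
--     FN = 0
--     RN = 0
--
--     for card in cards:
--         if(card[0] == '1'):
--             SW += 1
--         else:
--             if(card[1] == "S"):
--                 if(card[0] == "K" or card[0] == "Q" or card[0] == "J"):
--                     FS += 1
--                 else:
--                     RS += 1
--
--             else:
--                 if(card[0] == "K" or card[0] == "Q" or card[0] == "J"):
--                     FN += 1
--                 else:
--                     RN += 1
--
--
--     state = str(SW) + '-' + str(FS) + '-'+str(RS)+ '-' + str(FN)+ '-' + str(RN)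
--     return state
-- ===== SOURCE B (Python) =====
-- def bidStateCalc(cards):
--     SW = sum(1 for c in cards if c[0] == '1')
--     FS = sum(1 for c in cards if c[0] != '1' and c[1] == 'S' and c[0] in ('K', 'Q', 'J'))
--     RS = sum(1 for c in cards if c[0] != '1' and c[1] == 'S' and c[0] not in ('K', 'Q', 'J'))
--     FN = sum(1 for c in cards if c[0] != '1' and c[1] != 'S' and c[0] in ('K', 'Q', 'J'))
--     RN = sum(1 for c in cards if c[0] != '1' and c[1] != 'S' and c[0] not in ('K', 'Q', 'J'))
--     return str(SW) + '-' + str(FS) + '-' + str(RS) + '-' + str(FN) + '-' + str(RN)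
-- ===== Notes on version B (the rewrite author's own statement) =====
-- stated objective: alternative
-- what changed: Replaces the single accumulating loop with five mutually-exclusive counters by five independent filtered counts, one per category, assembled into the same state string.
import Mathlib
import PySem

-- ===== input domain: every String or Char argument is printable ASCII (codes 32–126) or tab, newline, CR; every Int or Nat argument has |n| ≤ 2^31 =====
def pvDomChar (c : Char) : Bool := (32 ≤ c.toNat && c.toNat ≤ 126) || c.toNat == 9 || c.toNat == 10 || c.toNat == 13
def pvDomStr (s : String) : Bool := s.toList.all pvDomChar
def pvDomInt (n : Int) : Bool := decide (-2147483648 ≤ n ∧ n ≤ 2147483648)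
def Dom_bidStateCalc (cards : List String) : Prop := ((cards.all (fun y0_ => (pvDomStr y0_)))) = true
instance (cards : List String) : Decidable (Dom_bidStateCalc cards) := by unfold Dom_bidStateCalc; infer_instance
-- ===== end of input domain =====

-- ===== PORT A =====
-- B replaces A's single five-counter loop by five independent filtered counts; same output string.
-- Char access c[0]/c[1] via pyGet?; the ' ' default is only reached outside Pre_ (where Python raises IndexError).
def pvC0 (card : String) : Char := (PySem.Str.pyGet? card 0).getD ' '
def pvC1 (card : String) : Char := (PySem.Str.pyGet? card 1).getD ' '

def bidStateCalc (cards : List String) : String :=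
  let st := cards.foldl (fun (acc : Int × Int × Int × Int × Int) card =>
    let (SW, FS, RS, FN, RN) := acc
    if pvC0 card = '1' then (SW + 1, FS, RS, FN, RN)
    else if pvC1 card = 'S' then
      if pvC0 card = 'K' ∨ pvC0 card = 'Q' ∨ pvC0 card = 'J' then (SW, FS + 1, RS, FN, RN)
      else (SW, FS, RS + 1, FN, RN)
    else
      if pvC0 card = 'K' ∨ pvC0 card = 'Q' ∨ pvC0 card = 'J' then (SW, FS, RS, FN + 1, RN)
      else (SW, FS, RS, FN, RN + 1)) (0, 0, 0, 0, 0)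
  PySem.Int.toStr st.1 ++ "-" ++ PySem.Int.toStr st.2.1 ++ "-" ++ PySem.Int.toStr st.2.2.1
    ++ "-" ++ PySem.Int.toStr st.2.2.2.1 ++ "-" ++ PySem.Int.toStr st.2.2.2.2

-- ===== PORT B =====
def pvFace (card : String) : Bool := pvC0 card = 'K' || pvC0 card = 'Q' || pvC0 card = 'J'

def bidStateCalc_alt (cards : List String) : String :=
  let SW : Int := cards.countP (fun c => pvC0 c = '1')
  let FS : Int := cards.countP (fun c => pvC0 c ≠ '1' && pvC1 c = 'S' && pvFace c)
  let RS : Int := cards.countP (fun c => pvC0 c ≠ '1' && pvC1 c = 'S' && !pvFace c)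
  let FN : Int := cards.countP (fun c => pvC0 c ≠ '1' && pvC1 c ≠ 'S' && pvFace c)
  let RN : Int := cards.countP (fun c => pvC0 c ≠ '1' && pvC1 c ≠ 'S' && !pvFace c)
  PySem.Int.toStr SW ++ "-" ++ PySem.Int.toStr FS ++ "-" ++ PySem.Int.toStr RS
    ++ "-" ++ PySem.Int.toStr FN ++ "-" ++ PySem.Int.toStr RN

-- ===== PRECONDITION & SPEC =====
-- Pre_ excludes exactly the inputs where Python A raises IndexError: an empty card (card[0]),
-- or a non-'1'-leading card of length < 2 (card[1]); B raises there as well.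
def Pre_bidStateCalc (cards : List String) : Prop :=
  ∀ c ∈ cards, c.toList ≠ [] ∧ (c.toList.head? = some '1' ∨ 2 ≤ c.toList.length)
instance (cards : List String) : Decidable (Pre_bidStateCalc cards) := by
  unfold Pre_bidStateCalc; infer_instance
def pvWitness_bidStateCalc : List String := ["10S", "KS", "2S", "QH", "7D"]

def Spec_bidStateCalc (cards : List String) (out : String) : Prop := out = bidStateCalc_alt cards
instance (cards : List String) (out : String) : Decidable (Spec_bidStateCalc cards out) := by unfold Spec_bidStateCalc; infer_instance

-- ===== CLAIM (what is proved, stated in full; the proofs are below) =====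
def Claim_equal_bidStateCalc : Prop := ∀ (cards : List String), Dom_bidStateCalc cards → Pre_bidStateCalc cards → Spec_bidStateCalc cards (bidStateCalc cards)

-- ===== LEMMAS AND PROOFS =====

-- A's fold, starting from any accumulator, adds exactly B's five category counts.
theorem pvFold_eq (cards : List String) :
    ∀ (a b c d e : Int),
    cards.foldl (fun (acc : Int × Int × Int × Int × Int) card =>
      let (SW, FS, RS, FN, RN) := acc
      if pvC0 card = '1' then (SW + 1, FS, RS, FN, RN)
      else if pvC1 card = 'S' then
        if pvC0 card = 'K' ∨ pvC0 card = 'Q' ∨ pvC0 card = 'J' then (SW, FS + 1, RS, FN, RN)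
        else (SW, FS, RS + 1, FN, RN)
      else
        if pvC0 card = 'K' ∨ pvC0 card = 'Q' ∨ pvC0 card = 'J' then (SW, FS, RS, FN + 1, RN)
        else (SW, FS, RS, FN, RN + 1)) (a, b, c, d, e) =
    (a + cards.countP (fun x => pvC0 x = '1'),
     b + cards.countP (fun x => pvC0 x ≠ '1' && pvC1 x = 'S' && pvFace x),
     c + cards.countP (fun x => pvC0 x ≠ '1' && pvC1 x = 'S' && !pvFace x),
     d + cards.countP (fun x => pvC0 x ≠ '1' && pvC1 x ≠ 'S' && pvFace x),
     e + cards.countP (fun x => pvC0 x ≠ '1' && pvC1 x ≠ 'S' && !pvFace x)) := by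
  induction cards with
  | nil => intro a b c d e; simp
  | cons hd tl ih =>
    intro a b c d e
    have hf : (pvFace hd) = decide (pvC0 hd = 'K' ∨ pvC0 hd = 'Q' ∨ pvC0 hd = 'J') := by
      by_cases hk : pvC0 hd = 'K' <;> by_cases hq : pvC0 hd = 'Q' <;>
        by_cases hj : pvC0 hd = 'J' <;> simp [pvFace, hk, hq, hj]
    simp only [List.foldl_cons, List.countP_cons, hf]
    by_cases h1 : pvC0 hd = '1' <;>
      by_cases h2 : pvC1 hd = 'S' <;>
        by_cases h3 : pvC0 hd = 'K' ∨ pvC0 hd = 'Q' ∨ pvC0 hd = 'J' <;>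
          simp [h1, h2, h3, ih, Prod.mk.injEq] <;> omega

-- ===== VERDICT (by name: the statement is the Claim_ definition above) =====
theorem bidStateCalc_spec : Claim_equal_bidStateCalc := by
  intro cards _ _
  unfold Spec_bidStateCalc bidStateCalc bidStateCalc_alt
  simp only [pvFold_eq]
  norm_num
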